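-- pv_equiv track=rewrite | github.com/afzalimdad9/json2html | json2html/jsonconv.py | column_headers_from_list_of_dicts
-- ===== SOURCE A (Python) =====
-- def column_headers_from_list_of_dicts(inputted_json):
--     """
--         If suppose some key has array of objects and all the keys are same,
--         instead of creating a new row for each such entry,
--         club such values, thus it makes more sense and more readable table.
--
--         @example:
--             jsonObject = {
--                 "sampleData": [
--                     {"a":1, "b":2, "c":3},
--                     {"a":5, "b":6, "c":7}
--                 ]
--             }
--             OUTPUT:
--             _____________________________
--             |               |   |   |   |
--             |               | a | c | b |
--             |   sampleData  |---|---|---|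
--             |               | 1 | 3 | 2 |
--             |               | 5 | 7 | 6 |
--             -----------------------------
--
--         @contributed by: @muellermichel
--     """
--
--     if not inputted_json or not isinstance(inputted_json[0], dict):
--         return None
--
--     column_headers = inputted_json[0].keys()
--
--     for entry in inputted_json:
--         if not isinstance(entry, dict) or (len(entry.keys()) != len(column_headers)):
--             return None
--         for header in column_headers:
--             if header not in entry:
--                 return None
--     return column_headers
-- ===== SOURCE B (Python) =====
-- def column_headers_from_list_of_dicts(inputted_json):
--     if not inputted_json or not isinstance(inputted_json[0], dict):
--         return None
--     signature = sorted(inputted_json[0])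
--     for entry in inputted_json:
--         if not isinstance(entry, dict) or sorted(entry) != signature:
--             return None
--     return inputted_json[0].keys()
-- ===== Notes on version B (the rewrite author's own statement) =====
-- stated objective: alternative
-- what changed: Replaces A's per-entry length check plus inner membership loop with a sort-based comparison: the first dict's keys are sorted once into a signature, and each entry's sorted key list is compared to it.
import Mathlib
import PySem

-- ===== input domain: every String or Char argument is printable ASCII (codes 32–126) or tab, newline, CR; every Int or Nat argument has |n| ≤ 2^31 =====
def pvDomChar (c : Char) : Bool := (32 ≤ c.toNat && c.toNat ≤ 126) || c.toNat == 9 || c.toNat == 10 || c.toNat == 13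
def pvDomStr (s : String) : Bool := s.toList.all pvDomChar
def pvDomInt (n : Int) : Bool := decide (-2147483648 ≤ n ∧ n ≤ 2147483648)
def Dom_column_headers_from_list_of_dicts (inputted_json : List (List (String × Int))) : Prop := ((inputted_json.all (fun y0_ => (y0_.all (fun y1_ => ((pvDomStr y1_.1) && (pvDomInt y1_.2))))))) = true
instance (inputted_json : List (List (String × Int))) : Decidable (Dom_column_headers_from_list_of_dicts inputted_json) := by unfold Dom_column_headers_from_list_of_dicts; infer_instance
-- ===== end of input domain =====

-- B replaces A's per-entry length check + inner membership loop by comparing each entry's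
-- sorted key list against a sorted signature of the first entry's keys (alternative algorithm).
-- ===== PORT A =====
-- dict.keys() of an assoc list representing a Python dict (keys distinct under Pre_)
def chKeys (d : List (String × Int)) : List String := d.map Prod.fst

-- the outer 'for entry in inputted_json' loop of A, with its early returns
def chCheck (headers : List String) : List (List (String × Int)) → Option (List String)
  | [] => some headers
  | e :: rest =>
    if (chKeys e).length ≠ headers.length then none
    else if headers.all (fun h => (chKeys e).contains h) then chCheck headers rest
    else none

def column_headers_from_list_of_dicts (inputted_json : List (List (String × Int))) : Option (List String) :=
  match inputted_json with
  | [] => none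
  | first :: rest => chCheck (chKeys first) (first :: rest)

-- ===== PORT B =====
def column_headers_from_list_of_dicts_alt (inputted_json : List (List (String × Int))) : Option (List String) :=
  match inputted_json with
  | [] => none
  | first :: rest =>
    let signature : List String := PySem.List.sorted (first.map Prod.fst) (fun x => x) false
    if (first :: rest).all
        (fun e => PySem.List.sorted (e.map Prod.fst) (fun x => x) false = signature)
    then some (first.map Prod.fst) else none

-- ===== PRECONDITION & SPEC =====
-- Pre_ excludes association lists with duplicate keys inside one entry: such a list does not
-- represent a Python dict (a dict literal collapses duplicates), so no Python input reaches it.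
def Pre_column_headers_from_list_of_dicts (inputted_json : List (List (String × Int))) : Prop :=
  ∀ d ∈ inputted_json, (d.map Prod.fst).Nodup
instance (inputted_json : List (List (String × Int))) : Decidable (Pre_column_headers_from_list_of_dicts inputted_json) := by unfold Pre_column_headers_from_list_of_dicts; infer_instance

def pvWitness_column_headers_from_list_of_dicts : (List (List (String × Int))) :=
  [[("a", 1), ("b", 2)], [("b", 3), ("a", 4)]]

def Spec_column_headers_from_list_of_dicts (inputted_json : List (List (String × Int))) (out : Option (List String)) : Prop := out = column_headers_from_list_of_dicts_alt inputted_json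
instance (inputted_json : List (List (String × Int))) (out : Option (List String)) : Decidable (Spec_column_headers_from_list_of_dicts inputted_json out) := by unfold Spec_column_headers_from_list_of_dicts; infer_instance

-- ===== CLAIM (what is proved, stated in full; the proofs are below) =====
def Claim_equal_column_headers_from_list_of_dicts : Prop := ∀ (inputted_json : List (List (String × Int))), Dom_column_headers_from_list_of_dicts inputted_json → Pre_column_headers_from_list_of_dicts inputted_json → Spec_column_headers_from_list_of_dicts inputted_json (column_headers_from_list_of_dicts inputted_json)

-- ===== LEMMAS AND PROOFS =====

lemma ch_key_iff (hs ks : List String) (hh : hs.Nodup) :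
    (PySem.List.sorted ks (fun x => x) false = PySem.List.sorted hs (fun x => x) false) ↔
    (ks.length = hs.length ∧ ∀ h ∈ hs, h ∈ ks) := by
  rw [PySem.List.sorted_id_eq_sorted_id_iff_perm]
  constructor
  · intro hperm
    exact ⟨hperm.length_eq, fun x hx => hperm.mem_iff.mpr hx⟩
  · rintro ⟨hlen, hsub⟩
    have hsubp : hs.Subperm ks := List.Nodup.subperm hh hsub
    exact (hsubp.perm_of_length_le (le_of_eq hlen)).symm

lemma chCheck_eq (hs : List String) (hh : hs.Nodup) (l : List (List (String × Int)))
    (hl : ∀ e ∈ l, (e.map Prod.fst).Nodup) :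
    chCheck hs l =
      if l.all (fun e =>
          PySem.List.sorted (e.map Prod.fst) (fun x => x) false =
          PySem.List.sorted hs (fun x => x) false)
      then some hs else none := by
  induction l with
  | nil => simp [chCheck]
  | cons e rest ih =>
    have ih' := ih (fun d hd => hl d (List.mem_cons_of_mem _ hd))
    by_cases hb : PySem.List.sorted (e.map Prod.fst) (fun x => x) false =
        PySem.List.sorted hs (fun x => x) false
    · obtain ⟨hlen, hsub⟩ := (ch_key_iff hs _ hh).mp hb
      have hall : hs.all (fun h => (e.map Prod.fst).contains h) = true := by
        simp only [List.all_eq_true]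
        intro h hmem
        simpa using hsub h hmem
      simp only [chCheck, chKeys]
      rw [if_neg (not_not_intro hlen), if_pos hall, ih', List.all_cons]
      simp [hb]
    · have hno : ¬ ((e.map Prod.fst).length = hs.length ∧ ∀ h ∈ hs, h ∈ e.map Prod.fst) :=
        fun hc => hb ((ch_key_iff hs _ hh).mpr hc)
      simp only [chCheck, chKeys]
      rw [List.all_cons]
      conv_rhs => rw [if_neg (by simp [hb])]
      by_cases hlen : (e.map Prod.fst).length = hs.length
      · have hnsub : ¬ (hs.all (fun h => (e.map Prod.fst).contains h) = true) := by
          intro hall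
          exact hno ⟨hlen, fun h hm => by simpa using (List.all_eq_true.mp hall) h hm⟩
        rw [if_neg (not_not_intro hlen), if_neg hnsub]
      · rw [if_pos hlen]

-- ===== VERDICT (by name: the statement is the Claim_ definition above) =====
theorem column_headers_from_list_of_dicts_spec : Claim_equal_column_headers_from_list_of_dicts := by
  intro js _ hpre
  unfold Spec_column_headers_from_list_of_dicts
  cases js with
  | nil => rfl
  | cons first rest =>
    have hh : (first.map Prod.fst).Nodup := hpre first (List.mem_cons_self)
    simp only [column_headers_from_list_of_dicts, column_headers_from_list_of_dicts_alt]
    rw [chCheck_eq (chKeys first) hh (first :: rest) hpre]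
    simp [chKeys]
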